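-- pv_equiv track=rewrite | github.com/PrameyaDhaubhadel/MindBridge | app/safety.py | strip_unsafe_content
-- ===== SOURCE A (Python) =====
-- def strip_unsafe_content(text: str) -> str:
--     """Simple output sanitization to avoid accidentally returning harmful procedural content."""
--     blocked_markers = [
--         "here is how to kill",
--         "steps to self-harm",
--         "painless way to die",
--     ]
--     safe_text = text
--     for marker in blocked_markers:
--         safe_text = safe_text.replace(marker, "[removed unsafe content]")
--     return safe_text
-- ===== SOURCE B (Python) =====
-- BLOCKED_MARKERS = (
--     "here is how to kill",
--     "steps to self-harm",
--     "painless way to die",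
-- )
--
-- REPLACEMENT = "[removed unsafe content]"
--
--
-- def strip_unsafe_content(text: str) -> str:
--     """Single-pass output sanitization: replace each blocked marker occurrence in one scan."""
--     pieces = []
--     i = 0
--     n = len(text)
--     while i < n:
--         for marker in BLOCKED_MARKERS:
--             if text.startswith(marker, i):
--                 pieces.append(REPLACEMENT)
--                 i += len(marker)
--                 break
--         else:
--             pieces.append(text[i])
--             i += 1
--     return "".join(pieces)
-- ===== Notes on version B (the rewrite author's own statement) =====
-- stated objective: alternative
-- what changed: Replaces A's three sequential full-string str.replace passes with a single left-to-right scan that checks the markers in order at each position and substitutes the first match, emitting the output in one pass.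
import Mathlib
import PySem

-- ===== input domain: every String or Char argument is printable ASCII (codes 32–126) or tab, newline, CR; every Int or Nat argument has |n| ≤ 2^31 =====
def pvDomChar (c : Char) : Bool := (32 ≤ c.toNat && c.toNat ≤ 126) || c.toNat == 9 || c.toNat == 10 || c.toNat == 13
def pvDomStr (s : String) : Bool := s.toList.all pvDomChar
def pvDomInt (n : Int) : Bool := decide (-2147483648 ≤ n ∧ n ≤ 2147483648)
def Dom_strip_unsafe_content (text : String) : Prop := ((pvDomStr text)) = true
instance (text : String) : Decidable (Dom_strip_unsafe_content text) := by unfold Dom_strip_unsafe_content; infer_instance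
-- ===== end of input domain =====

-- B replaces A's three sequential str.replace passes by ONE left-to-right scan that
-- replaces the first matching marker at each position (same output; objective: alternative single-pass algorithm).

-- ===== PORT A =====
def strip_unsafe_content (text : String) : String :=
  let blocked_markers : List String :=
    ["here is how to kill", "steps to self-harm", "painless way to die"]
  blocked_markers.foldl
    (fun safe_text marker => PySem.Str.replace safe_text marker "[removed unsafe content]")
    text

-- ===== PORT B =====
def pvM1 : List Char := "here is how to kill".toList
def pvM2 : List Char := "steps to self-harm".toList
def pvM3 : List Char := "painless way to die".toList
def pvRep : List Char := "[removed unsafe content]".toList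

-- Source B's while loop over positions, with the for-loop's marker checks in order:
def stripScan : List Char → List Char
  | [] => []
  | c :: t =>
    if pvM1.isPrefixOf (c :: t) then pvRep ++ stripScan ((c :: t).drop pvM1.length)
    else if pvM2.isPrefixOf (c :: t) then pvRep ++ stripScan ((c :: t).drop pvM2.length)
    else if pvM3.isPrefixOf (c :: t) then pvRep ++ stripScan ((c :: t).drop pvM3.length)
    else c :: stripScan t
termination_by l => l.length
decreasing_by all_goals (simp; try decide)

def strip_unsafe_content_alt (text : String) : String :=
  String.ofList (stripScan text.toList)

-- ===== PRECONDITION & SPEC =====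
def Spec_strip_unsafe_content (text : String) (out : String) : Prop := out = strip_unsafe_content_alt text
instance (text : String) (out : String) : Decidable (Spec_strip_unsafe_content text out) := by unfold Spec_strip_unsafe_content; infer_instance

-- ===== CLAIM (what is proved, stated in full; the proofs are below) =====
def Claim_equal_strip_unsafe_content : Prop := ∀ (text : String), Dom_strip_unsafe_content text → Spec_strip_unsafe_content text (strip_unsafe_content text)


-- ===== LEMMAS AND PROOFS =====

-- single-marker scan: what one Python str.replace pass (nonempty pattern) computes
def scan1 (m rep : List Char) : List Char → List Char
  | [] => []
  | c :: t =>
    if m.isPrefixOf (c :: t) ∧ 0 < m.length then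
      rep ++ scan1 m rep (t.drop (m.length - 1))
    else c :: scan1 m rep t
termination_by l => l.length
decreasing_by all_goals simp

theorem scan1_nil (m rep : List Char) : scan1 m rep [] = [] := by simp [scan1]

theorem scan1_pos (m rep : List Char) (hm : m ≠ []) {l : List Char} (h : m <+: l) (hl : l ≠ []) :
    scan1 m rep l = rep ++ scan1 m rep (l.drop m.length) := by
  cases l with
  | nil => exact absurd rfl hl
  | cons c t =>
    rw [scan1, if_pos ⟨List.isPrefixOf_iff_prefix.mpr h, List.length_pos_iff.mpr hm⟩]
    cases m with
    | nil => exact absurd rfl hm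
    | cons a as =>
      have h0 : a = c := (List.cons_prefix_cons.mp h).1
      simp

theorem scan1_neg (m rep : List Char) {c : Char} {t : List Char} (h : ¬ m <+: (c :: t)) :
    scan1 m rep (c :: t) = c :: scan1 m rep t := by
  rw [scan1, if_neg]
  rintro ⟨h1, -⟩
  exact h (List.isPrefixOf_iff_prefix.mp h1)

-- L1: the scan passes over a block none of whose suffixes is compatible with the marker
theorem scan1_append (m rep : List Char) :
    ∀ a : List Char, (∀ v, v <:+ a → v ≠ [] → ¬ m <+: v ∧ ¬ v <+: m) →
      ∀ x, scan1 m rep (a ++ x) = a ++ scan1 m rep x := by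
  intro a
  induction a with
  | nil => intro _ x; simp
  | cons c a' ih =>
    intro hc x
    have hnp : ¬ m <+: c :: (a' ++ x) := by
      intro hpre
      rcases List.prefix_or_prefix_of_prefix hpre (List.prefix_append (c :: a') x) with h1 | h1
      · exact (hc (c :: a') List.suffix_rfl (by simp)).1 h1
      · exact (hc (c :: a') List.suffix_rfl (by simp)).2 h1
    show scan1 m rep (c :: (a' ++ x)) = c :: (a' ++ scan1 m rep x)
    rw [scan1_neg m rep hnp,
        ih (fun v hv hne => hc v (hv.trans (List.suffix_cons c a')) hne) x]

-- L2: the scan cannot create a new occurrence of a marker m whose characters never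
-- start the replacement string
theorem scan1_not_prefix (m' rep m : List Char) (hm' : m' ≠ []) (hrep : rep ≠ [])
    (hhead : ∀ c ∈ m, some c ≠ rep.head?) :
    ∀ t u, u <:+ m → u ≠ [] → ¬ u <+: t → ¬ u <+: scan1 m' rep t := by
  intro t
  induction t with
  | nil =>
    intro u hu hne hnp
    rw [scan1_nil]
    intro hpre
    exact hne (List.prefix_nil.mp hpre)
  | cons c t' ih =>
    intro u hu hne hnp
    by_cases hp : m' <+: (c :: t')
    · rw [scan1_pos m' rep hm' hp (by simp)]
      intro hpre
      cases u with
      | nil => exact hne rfl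
      | cons u0 us =>
        cases rep with
        | nil => exact hrep rfl
        | cons r0 rs =>
          rw [List.cons_append, List.cons_prefix_cons] at hpre
          exact hhead u0 (hu.subset (by simp)) (by simp [hpre.1])
    · rw [scan1_neg m' rep hp]
      intro hpre
      cases u with
      | nil => exact hne rfl
      | cons u0 us =>
        rw [List.cons_prefix_cons] at hpre
        obtain ⟨rfl, hus⟩ := hpre
        cases us with
        | nil => exact hnp (List.cons_prefix_cons.mpr ⟨rfl, List.nil_prefix⟩)
        | cons v vs =>
          exact ih (v :: vs) ((List.suffix_cons u0 (v :: vs)).trans hu) (by simp)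
            (fun hvp => hnp (List.cons_prefix_cons.mpr ⟨rfl, hvp⟩)) hus

-- the fuel loop behind PySem.Chars.replace computes scan1
theorem go_eq_scan1 (old new : List Char) (hold : old ≠ []) :
    ∀ fuel l acc, l.length ≤ fuel →
      PySem.Chars.replace.go old new fuel l acc = acc.reverse ++ scan1 old new l := by
  intro fuel
  induction fuel with
  | zero =>
    intro l acc hl
    have hl0 : l = [] := by cases l with
      | nil => rfl
      | cons c t => simp at hl
    subst hl0
    rw [PySem.Chars.replace.go.eq_def, scan1_nil]
  | succ n ih =>
    intro l acc hl
    cases l with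
    | nil =>
      rw [PySem.Chars.replace.go.eq_def, scan1_nil]
      simp
    | cons c t =>
      have hop : 0 < old.length := List.length_pos_iff.mpr hold
      rw [PySem.Chars.replace.go.eq_def]
      by_cases hp : old.isPrefixOf (c :: t) = true
      · simp only [hp, if_true]
        have hlen : (List.drop old.length (c :: t)).length ≤ n := by
          simp only [List.length_drop, List.length_cons]
          simp only [List.length_cons] at hl
          omega
        rw [ih _ _ hlen,
            scan1_pos old new hold (List.isPrefixOf_iff_prefix.mp hp) (by simp)]
        simp
      · simp only [hp]
        rw [ih t (c :: acc) (by simp only [List.length_cons] at hl ⊢; omega),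
            scan1_neg old new (fun hc => hp (List.isPrefixOf_iff_prefix.mpr hc))]
        simp

theorem replace_eq_scan1 (s old new : List Char) (hold : old ≠ []) :
    PySem.Chars.replace s old new = scan1 old new s := by
  rw [PySem.Chars.replace, if_neg (by simp [List.isEmpty_iff, hold])]
  simpa using go_eq_scan1 old new hold s.length s [] le_rfl

-- decidable form of the suffix-compatibility condition
theorem sufCond_of_all (a m : List Char)
    (h : a.tails.all (fun v => v.isEmpty || (!(m.isPrefixOf v) && !(v.isPrefixOf m))) = true) :
    ∀ v, v <:+ a → v ≠ [] → ¬ m <+: v ∧ ¬ v <+: m := by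
  intro v hv hne
  have hv' := List.all_eq_true.mp h v ((List.mem_tails v a).mpr hv)
  simp only [Bool.or_eq_true, List.isEmpty_iff, Bool.and_eq_true, Bool.not_eq_true'] at hv'
  rcases hv' with h1 | h1
  · exact absurd h1 hne
  · exact ⟨fun hp => by simp [List.isPrefixOf_iff_prefix.mpr hp] at h1,
           fun hp => by simp [List.isPrefixOf_iff_prefix.mpr hp] at h1⟩

-- concrete non-interaction facts between the markers and the replacement
set_option maxRecDepth 10000 in
theorem cond_rep_m2 : ∀ v, v <:+ pvRep → v ≠ [] → ¬ pvM2 <+: v ∧ ¬ v <+: pvM2 :=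
  sufCond_of_all _ _ (by decide)
set_option maxRecDepth 10000 in
theorem cond_rep_m3 : ∀ v, v <:+ pvRep → v ≠ [] → ¬ pvM3 <+: v ∧ ¬ v <+: pvM3 :=
  sufCond_of_all _ _ (by decide)
set_option maxRecDepth 10000 in
theorem cond_m2_m1 : ∀ v, v <:+ pvM2 → v ≠ [] → ¬ pvM1 <+: v ∧ ¬ v <+: pvM1 :=
  sufCond_of_all _ _ (by decide)
set_option maxRecDepth 10000 in
theorem cond_m3_m1 : ∀ v, v <:+ pvM3 → v ≠ [] → ¬ pvM1 <+: v ∧ ¬ v <+: pvM1 :=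
  sufCond_of_all _ _ (by decide)
set_option maxRecDepth 10000 in
theorem cond_m3_m2 : ∀ v, v <:+ pvM3 → v ≠ [] → ¬ pvM2 <+: v ∧ ¬ v <+: pvM2 :=
  sufCond_of_all _ _ (by decide)
set_option maxRecDepth 10000 in
theorem head_m2_all : (pvM2.all (fun c => !(some c == pvRep.head?))) = true := by decide
theorem head_m2 : ∀ c ∈ pvM2, some c ≠ pvRep.head? := by
  intro c hc
  simpa using List.all_eq_true.mp head_m2_all c hc
set_option maxRecDepth 10000 in
theorem head_m3_all : (pvM3.all (fun c => !(some c == pvRep.head?))) = true := by decide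
theorem head_m3 : ∀ c ∈ pvM3, some c ≠ pvRep.head? := by
  intro c hc
  simpa using List.all_eq_true.mp head_m3_all c hc

-- unfolding lemmas for stripScan
theorem stripScan_pos1 {l : List Char} (h : pvM1 <+: l) (hl : l ≠ []) :
    stripScan l = pvRep ++ stripScan (l.drop pvM1.length) := by
  cases l with
  | nil => exact absurd rfl hl
  | cons c t => rw [stripScan, if_pos (List.isPrefixOf_iff_prefix.mpr h)]

theorem stripScan_pos2 {l : List Char} (h1 : ¬ pvM1 <+: l) (h : pvM2 <+: l) (hl : l ≠ []) :
    stripScan l = pvRep ++ stripScan (l.drop pvM2.length) := by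
  cases l with
  | nil => exact absurd rfl hl
  | cons c t =>
    rw [stripScan, if_neg (fun hb => h1 (List.isPrefixOf_iff_prefix.mp hb)),
        if_pos (List.isPrefixOf_iff_prefix.mpr h)]

theorem stripScan_pos3 {l : List Char} (h1 : ¬ pvM1 <+: l) (h2 : ¬ pvM2 <+: l)
    (h : pvM3 <+: l) (hl : l ≠ []) :
    stripScan l = pvRep ++ stripScan (l.drop pvM3.length) := by
  cases l with
  | nil => exact absurd rfl hl
  | cons c t =>
    rw [stripScan, if_neg (fun hb => h1 (List.isPrefixOf_iff_prefix.mp hb)),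
        if_neg (fun hb => h2 (List.isPrefixOf_iff_prefix.mp hb)),
        if_pos (List.isPrefixOf_iff_prefix.mpr h)]

theorem stripScan_neg {c : Char} {t : List Char} (h1 : ¬ pvM1 <+: (c :: t))
    (h2 : ¬ pvM2 <+: (c :: t)) (h3 : ¬ pvM3 <+: (c :: t)) :
    stripScan (c :: t) = c :: stripScan t := by
  rw [stripScan, if_neg (fun hb => h1 (List.isPrefixOf_iff_prefix.mp hb)),
      if_neg (fun hb => h2 (List.isPrefixOf_iff_prefix.mp hb)),
      if_neg (fun hb => h3 (List.isPrefixOf_iff_prefix.mp hb))]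

-- main lemma: the three sequential replace scans equal the one-pass scan
theorem main_scan : ∀ (n : Nat) (l : List Char), l.length ≤ n →
    scan1 pvM3 pvRep (scan1 pvM2 pvRep (scan1 pvM1 pvRep l)) = stripScan l := by
  intro n
  induction n with
  | zero =>
    intro l hl
    have hl0 : l = [] := by cases l with
      | nil => rfl
      | cons c t => simp at hl
    subst hl0
    simp [scan1_nil, stripScan]
  | succ n ih =>
    intro l hl
    cases l with
    | nil => simp [scan1_nil, stripScan]
    | cons c t =>
      by_cases h1 : pvM1 <+: (c :: t)
      · obtain ⟨x, hx⟩ := h1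
        rw [← hx] at hl ⊢
        have e1 : scan1 pvM1 pvRep (pvM1 ++ x) = pvRep ++ scan1 pvM1 pvRep x := by
          rw [scan1_pos pvM1 pvRep (by decide) (List.prefix_append _ _) (by simp [pvM1]),
              List.drop_left]
        rw [e1, scan1_append pvM2 pvRep pvRep cond_rep_m2,
            scan1_append pvM3 pvRep pvRep cond_rep_m3,
            stripScan_pos1 (List.prefix_append _ _) (by simp [pvM1]), List.drop_left,
            ih x (by simp [pvM1] at hl; omega)]
      · by_cases h2 : pvM2 <+: (c :: t)
        · obtain ⟨x, hx⟩ := h2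
          rw [← hx] at hl h1 ⊢
          have e2 : scan1 pvM2 pvRep (pvM2 ++ scan1 pvM1 pvRep x)
              = pvRep ++ scan1 pvM2 pvRep (scan1 pvM1 pvRep x) := by
            rw [scan1_pos pvM2 pvRep (by decide) (List.prefix_append _ _) (by simp [pvM2]),
                List.drop_left]
          rw [scan1_append pvM1 pvRep pvM2 cond_m2_m1, e2,
              scan1_append pvM3 pvRep pvRep cond_rep_m3,
              stripScan_pos2 h1 (List.prefix_append _ _) (by simp [pvM2]), List.drop_left,
              ih x (by simp [pvM2] at hl; omega)]
        · by_cases h3 : pvM3 <+: (c :: t)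
          · obtain ⟨x, hx⟩ := h3
            rw [← hx] at hl h1 h2 ⊢
            have e3 : scan1 pvM3 pvRep (pvM3 ++ scan1 pvM2 pvRep (scan1 pvM1 pvRep x))
                = pvRep ++ scan1 pvM3 pvRep (scan1 pvM2 pvRep (scan1 pvM1 pvRep x)) := by
              rw [scan1_pos pvM3 pvRep (by decide) (List.prefix_append _ _) (by simp [pvM3]),
                  List.drop_left]
            rw [scan1_append pvM1 pvRep pvM3 cond_m3_m1,
                scan1_append pvM2 pvRep pvM3 cond_m3_m2, e3,
                stripScan_pos3 h1 h2 (List.prefix_append _ _) (by simp [pvM3]), List.drop_left,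
                ih x (by simp [pvM3] at hl; omega)]
          · have e1 : scan1 pvM1 pvRep (c :: t) = c :: scan1 pvM1 pvRep t :=
              scan1_neg pvM1 pvRep h1
            have h2' : ¬ pvM2 <+: (c :: scan1 pvM1 pvRep t) := by
              rw [← e1]
              exact scan1_not_prefix pvM1 pvRep pvM2 (by decide) (by decide) head_m2
                (c :: t) pvM2 List.suffix_rfl (by decide) h2
            have e2 : scan1 pvM2 pvRep (c :: scan1 pvM1 pvRep t)
                = c :: scan1 pvM2 pvRep (scan1 pvM1 pvRep t) := scan1_neg pvM2 pvRep h2'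
            have h3' : ¬ pvM3 <+: (c :: scan1 pvM2 pvRep (scan1 pvM1 pvRep t)) := by
              rw [← e2, ← e1]
              exact scan1_not_prefix pvM2 pvRep pvM3 (by decide) (by decide) head_m3
                (scan1 pvM1 pvRep (c :: t)) pvM3 List.suffix_rfl (by decide)
                (scan1_not_prefix pvM1 pvRep pvM3 (by decide) (by decide) head_m3
                  (c :: t) pvM3 List.suffix_rfl (by decide) h3)
            rw [e1, e2, scan1_neg pvM3 pvRep h3', ih t (by simp at hl; omega),
                stripScan_neg h1 h2 h3]


-- ===== VERDICT (by name: the statement is the Claim_ definition above) =====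
theorem strip_unsafe_content_spec : Claim_equal_strip_unsafe_content := by
  intro text _
  show strip_unsafe_content text = strip_unsafe_content_alt text
  unfold strip_unsafe_content strip_unsafe_content_alt
  simp only [List.foldl, PySem.Str.replace, String.toList_ofList]
  rw [replace_eq_scan1 _ _ _ (by decide), replace_eq_scan1 _ _ _ (by decide),
      replace_eq_scan1 _ _ _ (by decide)]
  exact congrArg String.ofList (main_scan text.toList.length text.toList le_rfl)
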